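-- pv_equiv track=rewrite | github.com/timholds/3b1b_dataset | scripts/scene_relationship_analyzer.py | _extract_purpose
-- ===== SOURCE A (Python) =====
-- def _extract_purpose(code: str) -> str:
--     """Extract educational purpose from docstrings or comments."""
--     lines = code.split('\n')
--
--     # Look for docstrings
--     in_docstring = False
--     docstring_lines = []
--
--     for line in lines:
--         if '"""' in line or "'''" in line:
--             if in_docstring:
--                 docstring_lines.append(line)
--                 in_docstring = False
--                 break
--             else:
--                 in_docstring = True
--                 docstring_lines.append(line)
--         elif in_docstring:
--             docstring_lines.append(line)
--
--     if docstring_lines: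
--         return ' '.join(docstring_lines).strip()
--
--     # Look for leading comments
--     for line in lines[:5]:
--         if line.strip().startswith('#') and len(line.strip()) > 10:
--             return line.strip()[1:].strip()
--
--     return ""
-- ===== SOURCE B (Python) =====
-- def _extract_purpose(code: str) -> str:
--     """Extract educational purpose from docstrings or comments."""
--     lines = code.split('\n')
--
--     # Indices of all lines that contain a triple-quote delimiter.
--     idxs = [i for i, line in enumerate(lines) if '"""' in line or "'''" in line]
--     if idxs:
--         # docstring runs from the first delimiter line through the second
--         # delimiter line, or to the end of the file if there is no second one
--         end = idxs[1] if len(idxs) > 1 else len(lines) - 1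
--         return ' '.join(lines[idxs[0]:end + 1]).strip()
--
--     # Otherwise: first long leading '#' comment among the first five lines.
--     return next(
--         (s[1:].strip() for line in lines[:5]
--          if (s := line.strip()).startswith('#') and len(s) > 10),
--         '')
-- ===== Notes on version B (the rewrite author's own statement) =====
-- stated objective: simpler
-- what changed: Replaces A's stateful scan (in_docstring flag, accumulator, break) by computing the list of delimiter-line indices once and taking one slice lines[first:second+1] (or to end of file), and replaces the comment-fallback loop by a single next() over a generator.
import Mathlib
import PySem

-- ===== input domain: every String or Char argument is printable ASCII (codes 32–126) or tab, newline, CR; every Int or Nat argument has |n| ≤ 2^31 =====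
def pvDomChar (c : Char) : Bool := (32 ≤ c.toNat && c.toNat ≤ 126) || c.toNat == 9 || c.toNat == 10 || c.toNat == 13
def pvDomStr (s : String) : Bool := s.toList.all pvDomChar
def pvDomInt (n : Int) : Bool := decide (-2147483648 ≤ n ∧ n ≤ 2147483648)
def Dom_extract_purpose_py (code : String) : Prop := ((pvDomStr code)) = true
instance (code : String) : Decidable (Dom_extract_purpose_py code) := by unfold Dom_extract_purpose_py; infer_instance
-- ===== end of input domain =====

-- B replaces A's stateful delimiter scan by one slice between the first two
-- delimiter-line indices, and the fallback loop by a find-first; simpler, same cost.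

-- ===== PORT A =====
-- the for-loop with the in_docstring flag, the accumulator and the break
def pvALoop (ind : Bool) (acc : List String) : List String → List String
  | [] => acc
  | l :: ls =>
    if PySem.Str.isIn "\"\"\"" l || PySem.Str.isIn "'''" l then
      if ind then acc ++ [l]                 -- append, then break
      else pvALoop true (acc ++ [l]) ls
    else
      if ind then pvALoop ind (acc ++ [l]) ls
      else pvALoop ind acc ls

-- the 'for line in lines[:5]' comment loop
def pvAFallback : List String → String
  | [] => ""
  | l :: ls =>
    if PySem.Str.startswith (PySem.Str.strip l) "#" && PySem.Str.len (PySem.Str.strip l) > 10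
    then PySem.Str.strip (PySem.Str.slice (PySem.Str.strip l) (some 1) none)
    else pvAFallback ls

def extract_purpose_py (code : String) : String :=
  let lines := (PySem.Str.split? code "\n").getD []
  let ds := pvALoop false [] lines
  if ds.isEmpty then pvAFallback (PySem.List.slice lines none (some 5))
  else PySem.Str.strip (PySem.Str.join " " ds)

-- ===== PORT B =====
-- next((s[1:].strip() for line in cands if (s := line.strip()).startswith('#') and len(s) > 10), '')
def pvBFallback (cands : List String) : String :=
  ((cands.find? (fun l =>
      PySem.Str.startswith (PySem.Str.strip l) "#" && PySem.Str.len (PySem.Str.strip l) > 10)).map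
    (fun l => PySem.Str.strip (PySem.Str.slice (PySem.Str.strip l) (some 1) none))).getD ""

def extract_purpose_py_alt (code : String) : String :=
  let lines := (PySem.Str.split? code "\n").getD []
  let idxs := ((PySem.List.enumerate lines).filter
      (fun p => PySem.Str.isIn "\"\"\"" p.2 || PySem.Str.isIn "'''" p.2)).map (·.1)
  match idxs with
  | [] => pvBFallback (PySem.List.slice lines none (some 5))
  | s :: rest =>
    let e : Int := match rest with | e :: _ => e | [] => PySem.List.len lines - 1
    PySem.Str.strip (PySem.Str.join " " (PySem.List.slice lines (some s) (some (e + 1))))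

-- ===== PRECONDITION & SPEC =====
def Spec_extract_purpose_py (code : String) (out : String) : Prop := out = extract_purpose_py_alt code
instance (code : String) (out : String) : Decidable (Spec_extract_purpose_py code out) := by unfold Spec_extract_purpose_py; infer_instance

-- ===== CLAIM (what is proved, stated in full; the proofs are below) =====
def Claim_equal_extract_purpose_py : Prop := ∀ (code : String), Dom_extract_purpose_py code → Spec_extract_purpose_py code (extract_purpose_py code)

-- ===== LEMMAS AND PROOFS =====

-- proof-side abbreviations: the delimiter test, A's two loop phases, and the
-- Nat-valued list of delimiter-line indices
def pvD (l : String) : Bool := PySem.Str.isIn "\"\"\"" l || PySem.Str.isIn "'''" l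

def pvTakeIncl : List String → List String
  | [] => []
  | l :: ls => if pvD l then [l] else l :: pvTakeIncl ls

def pvPhase1 : List String → List String
  | [] => []
  | l :: ls => if pvD l then l :: pvTakeIncl ls else pvPhase1 ls

def pvNatIdxs : List String → List Nat
  | [] => []
  | l :: ls => if pvD l then 0 :: (pvNatIdxs ls).map (· + 1) else (pvNatIdxs ls).map (· + 1)

theorem pvALoop_true (ls : List String) : ∀ acc, pvALoop true acc ls = acc ++ pvTakeIncl ls := by
  induction ls with
  | nil => intro acc; simp [pvALoop, pvTakeIncl]
  | cons l ls ih =>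
    intro acc
    by_cases h : pvD l = true <;>
      simp [pvALoop, pvTakeIncl, pvD] at h ⊢ <;> simp [h, ih]

theorem pvALoop_false (ls : List String) : ∀ acc, pvALoop false acc ls = acc ++ pvPhase1 ls := by
  induction ls with
  | nil => intro acc; simp [pvALoop, pvPhase1]
  | cons l ls ih =>
    intro acc
    by_cases h : pvD l = true <;>
      simp [pvALoop, pvPhase1, pvD] at h ⊢ <;> simp [h, ih, pvALoop_true]

theorem pvIdxs_shift (ls : List String) : ∀ s : Int,
    ((PySem.List.enumerate ls s).filter (fun p => pvD p.2)).map (·.1)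
      = (pvNatIdxs ls).map (fun (n : Nat) => (n : Int) + s) := by
  induction ls with
  | nil => intro s; simp [PySem.List.enumerate_nil, pvNatIdxs]
  | cons l ls ih =>
    intro s
    rw [PySem.List.enumerate_cons]
    by_cases h : pvD l = true
    · rw [List.filter_cons_of_pos (by simpa using h)]
      simp only [List.map_cons, ih (s + 1), pvNatIdxs, h, if_pos, List.map_map]
      congr 1
      · simp
      · apply List.map_congr_left; intro n _; simp [Function.comp]; ring
    · rw [List.filter_cons_of_neg (by simpa using h)]
      simp only [ih (s + 1), pvNatIdxs, h, if_neg, Bool.false_eq_true, not_false_iff, List.map_map]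
      apply List.map_congr_left; intro n _; simp [Function.comp]; ring

theorem pvIdxs_nil_iff (ls : List String) : pvNatIdxs ls = [] ↔ pvPhase1 ls = [] := by
  induction ls with
  | nil => simp [pvNatIdxs, pvPhase1]
  | cons l ls ih =>
    by_cases h : pvD l = true <;> simp [pvNatIdxs, pvPhase1, h, ih]

theorem pvTakeIncl_all (ls : List String) (h : pvNatIdxs ls = []) : pvTakeIncl ls = ls := by
  induction ls with
  | nil => rfl
  | cons l ls ih =>
    by_cases hd : pvD l = true
    · simp [pvNatIdxs, hd] at h
    · simp [pvNatIdxs, hd] at h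
      simp [pvTakeIncl, hd, ih h]

theorem pvTakeIncl_first (ls : List String) : ∀ n r, pvNatIdxs ls = n :: r →
    pvTakeIncl ls = ls.take (n + 1) := by
  induction ls with
  | nil => intro n r h; simp [pvNatIdxs] at h
  | cons l ls ih =>
    intro n r h
    by_cases hd : pvD l = true
    · simp only [pvNatIdxs, hd, if_pos, List.cons.injEq] at h
      simp [pvTakeIncl, hd, ← h.1]
    · simp only [pvNatIdxs, hd, Bool.false_eq_true, if_neg, not_false_iff] at h
      cases hls : pvNatIdxs ls with
      | nil => rw [hls] at h; simp at h
      | cons n' r' =>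
        rw [hls] at h
        simp only [List.map_cons, List.cons.injEq] at h
        have := ih n' r' hls
        simp [pvTakeIncl, hd, this, ← h.1, List.take_succ_cons]

-- main: A's docstring_lines equal B's slice between the first two delimiter indices
theorem pvMainCons (ls : List String) : ∀ s r, pvNatIdxs ls = s :: r →
    pvPhase1 ls = PySem.List.slice ls (some (s : Int))
      (some ((match r with | e :: _ => (e : Int) | [] => (ls.length : Int) - 1) + 1)) := by
  induction ls with
  | nil => intro s r h; simp [pvNatIdxs] at h
  | cons l ls ih =>
    intro s r h
    by_cases hd : pvD l = true
    · simp only [pvNatIdxs, hd, if_pos, List.cons.injEq] at h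
      obtain ⟨hs, hr⟩ := h
      subst hs
      cases hls : pvNatIdxs ls with
      | nil =>
        rw [hls] at hr; simp at hr; subst hr
        have h2 : (((l :: ls).length : Int) - 1) + 1 = (((l :: ls).length : Nat) : Int) := by ring
        rw [h2]
        simp only [Nat.cast_zero, PySem.List.slice_zero_start, PySem.List.slice_to_natCast]
        simp [pvPhase1, hd, pvTakeIncl_all ls hls]
      | cons n' r' =>
        rw [hls] at hr
        simp only [List.map_cons] at hr
        rw [← hr]
        have h2 : ((n' + 1 : Nat) : Int) + 1 = (((n' + 2 : Nat)) : Int) := by push_cast; ring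
        simp only [h2, Nat.cast_zero, PySem.List.slice_zero_start, PySem.List.slice_to_natCast]
        simp [pvPhase1, hd, pvTakeIncl_first ls n' r' hls, List.take_succ_cons]
    · simp only [pvNatIdxs, hd, Bool.false_eq_true, if_neg, not_false_iff] at h
      cases hls : pvNatIdxs ls with
      | nil => rw [hls] at h; simp at h
      | cons n' r' =>
        rw [hls] at h
        simp only [List.map_cons, List.cons.injEq] at h
        obtain ⟨hs, hr⟩ := h
        have ihe := ih n' r' hls
        have hp : pvPhase1 (l :: ls) = pvPhase1 ls := by simp [pvPhase1, hd]
        rw [hp, ihe, ← hs, ← hr]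
        cases r' with
        | nil =>
          have h2 : ((ls.length : Int) - 1) + 1 = ((ls.length : Nat) : Int) := by ring
          have h3 : (((l :: ls).length : Int) - 1) + 1 = ((ls.length + 1 : Nat) : Int) := by
            simp
          simp only [List.map_nil, h2, h3, PySem.List.slice_natCast]
          simp only [List.drop_succ_cons]
          congr 1
          omega
        | cons e r'' =>
          have h2 : ((e : Nat) : Int) + 1 = (((e + 1 : Nat)) : Int) := by push_cast; ring
          have h3 : ((e + 1 : Nat) : Int) + 1 = (((e + 2 : Nat)) : Int) := by push_cast; ring
          simp only [List.map_cons, h2, h3, PySem.List.slice_natCast]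
          simp only [List.drop_succ_cons]
          congr 1
          omega

theorem pvFallback_eq (xs : List String) : pvAFallback xs = pvBFallback xs := by
  induction xs with
  | nil => rfl
  | cons l ls ih =>
    unfold pvAFallback pvBFallback
    rw [List.find?_cons]
    cases h : (PySem.Str.startswith (PySem.Str.strip l) "#"
        && decide (PySem.Str.len (PySem.Str.strip l) > 10)) with
    | true => rfl
    | false => exact ih

-- A's whole body equals B's whole body, for an arbitrary list of lines
theorem pvTop (lines : List String) :
    (let ds := pvALoop false [] lines;
     if ds.isEmpty then pvAFallback (PySem.List.slice lines none (some 5))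
     else PySem.Str.strip (PySem.Str.join " " ds))
    = (match ((PySem.List.enumerate lines).filter
          (fun p => PySem.Str.isIn "\"\"\"" p.2 || PySem.Str.isIn "'''" p.2)).map (·.1) with
       | [] => pvBFallback (PySem.List.slice lines none (some 5))
       | s :: rest =>
         PySem.Str.strip (PySem.Str.join " "
           (PySem.List.slice lines (some s)
             (some ((match rest with | e :: _ => e | [] => PySem.List.len lines - 1) + 1))))) := by
  have hidx : ((PySem.List.enumerate lines).filter
      (fun p => PySem.Str.isIn "\"\"\"" p.2 || PySem.Str.isIn "'''" p.2)).map (·.1)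
      = (pvNatIdxs lines).map (fun (n : Nat) => (n : Int)) := by
    have h := pvIdxs_shift lines 0
    simp only [add_zero] at h
    exact h
  rw [pvALoop_false]
  simp only [List.nil_append, hidx]
  cases hls : pvNatIdxs lines with
  | nil =>
    have hp : pvPhase1 lines = [] := (pvIdxs_nil_iff lines).mp hls
    simp [hp, pvFallback_eq]
  | cons s r =>
    have hp : ¬ (pvPhase1 lines).isEmpty = true := by
      intro h
      rw [(pvIdxs_nil_iff lines).mpr (by simpa using h)] at hls
      simp at hls
    have hm := pvMainCons lines s r hls
    simp only [List.map_cons, if_neg hp]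
    rw [hm]
    congr 2
    cases r <;> simp [PySem.List.len_eq]

-- ===== VERDICT (by name: the statement is the Claim_ definition above) =====
theorem extract_purpose_py_spec : Claim_equal_extract_purpose_py := by
  intro code _
  unfold Spec_extract_purpose_py extract_purpose_py extract_purpose_py_alt
  exact pvTop ((PySem.Str.split? code "\n").getD [])
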